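-- pv_equiv track=rewrite | github.com/DryGut/Codewars-Res | wholikesitCW.py | likes
-- ===== SOURCE A (Python) =====
-- def likes(names):
--     c = [i for i in names if names.count(i)]
--     b = len(names[2:])
--
--     if len(c) == 0:
--         return 'no one likes this'
--     elif len(c) == 1:
--         return f"{str(c[0])} likes this"
--     elif len(c) == 2:
--         return '{} and {}'.format(c[0], c[1]) + ' like this'
--     elif len(c) == 3:
--         return f"{'{}, {} and {}'.format(c[0], c[1], c[2])} like this"
--     elif len(c) > 0:
--         return f"{'{}, {}'.format(c[0], c[1])} and {b} others like this"
-- ===== SOURCE B (Python) =====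
-- def likes(names):
--     n = len(names)
--     display = list(names) if n <= 3 else names[:2] + [f"{n - 2} others"]
--     if not display:
--         display = ["no one"]
--     if len(display) == 1:
--         subject = display[0]
--     else:
--         subject = ", ".join(display[:-1]) + " and " + display[-1]
--     verb = "likes" if n <= 1 else "like"
--     return f"{subject} {verb} this"
-- ===== Notes on version B (the rewrite author's own statement) =====
-- stated objective: faster
-- what changed: Replaces A's five-branch if/elif cascade over a quadratic always-true count-filter copy with a uniform sentence assembly: a display list capped at two names plus an 'n-2 others' item, subject built by joining all-but-last with ', ' and appending ' and ' + last, and a separate verb-agreement choice.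
import Mathlib
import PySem

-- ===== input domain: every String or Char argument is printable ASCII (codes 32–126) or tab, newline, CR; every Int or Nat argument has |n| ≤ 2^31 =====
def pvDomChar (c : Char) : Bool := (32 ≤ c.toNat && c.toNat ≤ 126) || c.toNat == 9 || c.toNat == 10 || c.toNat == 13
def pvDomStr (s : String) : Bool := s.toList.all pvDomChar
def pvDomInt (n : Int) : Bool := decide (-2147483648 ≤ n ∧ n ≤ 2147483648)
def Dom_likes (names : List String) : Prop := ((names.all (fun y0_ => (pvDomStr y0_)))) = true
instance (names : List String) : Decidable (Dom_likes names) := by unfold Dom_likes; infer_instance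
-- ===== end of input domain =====

-- B assembles "subject verb this" uniformly: a display list (capped at two names plus "n-2 others"),
-- subject = join of all but the last plus " and " plus the last, instead of A's five-branch cascade.

-- ===== PORT A =====
def likes (names : List String) : String :=
  let c := names.filter (fun i => PySem.List.count names i != 0)
  let b : Int := (PySem.List.slice names (some 2) none).length
  if c.length = 0 then "no one likes this"
  else if c.length = 1 then
    PySem.List.pyGetD c 0 "" ++ " likes this"
  else if c.length = 2 then
    PySem.List.pyGetD c 0 "" ++ " and " ++ PySem.List.pyGetD c 1 "" ++ " like this"
  else if c.length = 3 then
    PySem.List.pyGetD c 0 "" ++ ", " ++ PySem.List.pyGetD c 1 "" ++ " and " ++ PySem.List.pyGetD c 2 "" ++ " like this"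
  else if c.length > 0 then
    PySem.List.pyGetD c 0 "" ++ ", " ++ PySem.List.pyGetD c 1 "" ++ " and " ++ PySem.Int.toStr b ++ " others like this"
  else ""  -- unreachable (Python would return None; never taken since length > 3 here)

-- ===== PORT B =====
-- display list, join-based subject assembly, verb agreement — no branch per count
def likes_alt (names : List String) : String :=
  let n : Int := names.length
  let display0 :=
    if n ≤ 3 then names
    else PySem.List.slice names none (some 2) ++ [PySem.Int.toStr (n - 2) ++ " others"]
  let display := if display0.length = 0 then ["no one"] else display0
  let subject :=
    if display.length = 1 then PySem.List.pyGetD display 0 ""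
    else PySem.Str.join ", " (PySem.List.slice display none (some (-1)))
         ++ " and " ++ PySem.List.pyGetD display (-1) ""
  let verb := if n ≤ 1 then "likes" else "like"
  subject ++ " " ++ verb ++ " this"

-- ===== PRECONDITION & SPEC =====
def Spec_likes (names : List String) (out : String) : Prop := out = likes_alt names
instance (names : List String) (out : String) : Decidable (Spec_likes names out) := by unfold Spec_likes; infer_instance

-- ===== CLAIM =====
def Claim_equal_likes : Prop := ∀ (names : List String), Dom_likes names → Spec_likes names (likes names)

-- ===== LEMMAS AND PROOFS =====

-- A's filter keeps every element (each member's count is ≥ 1), so c = names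
theorem likes_filter_eq (names : List String) :
    names.filter (fun i => PySem.List.count names i != 0) = names := by
  apply List.filter_eq_self.mpr
  intro a ha
  simp [PySem.List.count]
  exact List.count_pos_iff.mpr ha |>.ne'

-- used to collapse the join over a two-element display prefix back to string appends
theorem likes_ofList_comma_space (b : String) :
    String.ofList (',' :: ' ' :: b.toList) = ", " ++ b := by
  rw [show (',' :: ' ' :: b.toList) = (", ").toList ++ b.toList from rfl,
      String.ofList_append, String.ofList_toList, String.ofList_toList]

-- the join over the two shown names, as string appends
theorem likes_join_pair (x y : String) :
    String.ofList ([',', ' '].intercalate [x.toList, y.toList]) = x ++ ", " ++ y := by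
  rw [show [',', ' '].intercalate [x.toList, y.toList]
        = x.toList ++ ((", ").toList ++ y.toList) from by simp [List.intercalate],
      String.ofList_append, String.ofList_append, String.ofList_toList, String.ofList_toList,
      String.ofList_toList, String.append_assoc]

-- ===== VERDICT =====
theorem likes_spec : Claim_equal_likes := by
  intro names _
  show likes names = likes_alt names
  unfold likes likes_alt
  rw [likes_filter_eq, show ((2:Int)) = ((2:Nat):Int) from rfl, PySem.List.slice_from_natCast]
  rcases names with _ | ⟨a, _ | ⟨b, _ | ⟨c, _ | ⟨d, t⟩⟩⟩⟩ <;>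
      simp [PySem.List.pyGetD, PySem.List.pyGet?, PySem.List.pyIdx?, PySem.List.slice,
            PySem.Str.join, PySem.Chars.join, String.append_assoc]
  case cons.cons.nil => simp [List.intercalate]
  case cons.cons.cons.nil =>
    simp [List.intercalate, likes_ofList_comma_space, String.append_assoc]
  case cons.cons.cons.cons =>
    have h : ¬(((t.length : Int) + 1 + 1 + 1) < 3) := by omega
    have h0 : (0:Int) ≤ (t.length : Int) + 1 + 1 + 1 := by omega
    have h1 : (0:Int) ≤ (t.length : Int) + 1 + 1 := by omega
    have h2 : ¬(((t.length : Int) + 1 + 1) < 0) := by omega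
    have h3 : ((t.length : Int) + 1 + 1 + 1 + 1 - 2) = (t.length : Int) + 1 + 1 := by ring
    simp [h, h0, h1, h2, h3, likes_join_pair, String.append_assoc]
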